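-- pv_equiv track=rewrite | github.com/886814/Algorithm | BruteForce/프로그래머스 피로도.py | check
-- ===== SOURCE A (Python) =====
-- def check(nums,k):
--     now = k
--     for num in nums:
--         min_piro, consume_piro = num
--         if now >= min_piro:
--             now -= consume_piro
--         else:
--             return 0
--     else:
--         return 1
-- ===== SOURCE B (Python) =====
-- def check(nums, k):
--     # Pass 1: cumulative consumed fatigue before each dungeon (prefix excludes current).
--     prefix = [0]
--     for _mn, consume in nums:
--         prefix.append(prefix[-1] + consume)
--     # Pass 2: every dungeon must still be enterable given fatigue consumed before it.
--     return 1 if all(k - prefix[i] >= nums[i][0] for i in range(len(nums))) else 0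
-- ===== Notes on version B (the rewrite author's own statement) =====
-- stated objective: alternative
-- what changed: Replaces A's early-return loop over a mutable fatigue counter with two passes: first build the prefix-sum table of consumed fatigue, then check every dungeon's entry requirement against k minus the fatigue consumed before it.
-- outside the precondition, e.g. on check([[9, -4311], []], -1): A returns 0, B raises ValueError; on check([[1]], 5): A raises ValueError, B raises ValueError
import Mathlib
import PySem

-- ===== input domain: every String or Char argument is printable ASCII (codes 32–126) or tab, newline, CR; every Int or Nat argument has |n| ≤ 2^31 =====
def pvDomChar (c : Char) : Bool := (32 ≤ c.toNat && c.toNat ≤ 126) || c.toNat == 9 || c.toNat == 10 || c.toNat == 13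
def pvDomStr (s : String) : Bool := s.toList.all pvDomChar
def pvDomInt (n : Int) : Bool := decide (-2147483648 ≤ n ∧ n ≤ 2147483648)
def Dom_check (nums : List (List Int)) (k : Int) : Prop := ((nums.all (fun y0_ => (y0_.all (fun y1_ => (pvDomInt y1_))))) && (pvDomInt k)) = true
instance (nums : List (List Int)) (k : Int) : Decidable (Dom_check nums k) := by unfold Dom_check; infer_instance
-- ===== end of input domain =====

-- B replaces A's early-return loop over a mutable fatigue counter by two passes:
-- a prefix-sum table of consumed fatigue, then a check of every dungeon against it (objective: alternative).


-- ===== PORT A =====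
-- A's loop: keep the current fatigue 'now', unpack each dungeon, early-return 0 on failure.
def checkGo : List (List Int) → Int → Int
  | [], _now => 1
  | num :: rest, now =>
    let min_piro := num.getD 0 0
    let consume_piro := num.getD 1 0
    if now ≥ min_piro then checkGo rest (now - consume_piro) else 0

def check (nums : List (List Int)) (k : Int) : Int := checkGo nums k

-- ===== PORT B =====
-- Pass 1 of B: prefix-sum table of consumed fatigue (Python appends prefix[-1] + consume).
def buildPrefix : List (List Int) → List Int → List Int
  | [], acc => acc
  | num :: rest, acc => buildPrefix rest (acc ++ [acc.getLastD 0 + num.getD 1 0])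

def check_alt (nums : List (List Int)) (k : Int) : Int :=
  let pfx := buildPrefix nums [0]
  if (List.range nums.length).all
      (fun i => decide (k - pfx.getD i 0 ≥ (nums.getD i []).getD 0 0)) then 1 else 0

-- ===== PRECONDITION & SPEC =====
-- Pre_ excludes inputs where some dungeon is not a two-element list: unpacking
-- 'min_piro, consume_piro = num' raises ValueError in both A and B when the loop reaches such an
-- element (A's early return may return 0 before reaching it; B always reaches it and raises).
def Pre_check (nums : List (List Int)) (k : Int) : Prop :=
  ∀ num ∈ nums, num.length = 2
instance (nums : List (List Int)) (k : Int) : Decidable (Pre_check nums k) := by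
  unfold Pre_check; infer_instance
def pvWitness_check : List (List Int) × Int := ([[80, 20], [50, 40], [30, 10]], 80)

def Spec_check (nums : List (List Int)) (k : Int) (out : Int) : Prop := out = check_alt nums k
instance (nums : List (List Int)) (k : Int) (out : Int) : Decidable (Spec_check nums k out) := by unfold Spec_check; infer_instance

-- ===== CLAIM (what is proved, stated in full; the proofs are below) =====
def Claim_equal_check : Prop := ∀ (nums : List (List Int)) (k : Int), Dom_check nums k → Pre_check nums k → Spec_check nums k (check nums k)

-- ===== LEMMAS AND PROOFS =====

theorem getLastD_append_ne (acc1 acc2 : List Int) (h : acc2 ≠ []) :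
    (acc1 ++ acc2).getLastD 0 = acc2.getLastD 0 := by
  cases acc2 with
  | nil => simp at h
  | cons a l =>
    obtain ⟨y, hy⟩ := Option.isSome_iff_exists.mp ((a :: l).getLast?_isSome.mpr (by simp))
    simp [List.getLastD_eq_getLast?, List.getLast?_append_of_ne_nil (l₁ := acc1) h, hy]

theorem getLastD_singleton (x : Int) : ([x] : List Int).getLastD 0 = x := rfl

theorem buildPrefix_length (nums : List (List Int)) (acc : List Int) :
    (buildPrefix nums acc).length = acc.length + nums.length := by
  induction nums generalizing acc with
  | nil => simp [buildPrefix]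
  | cons num rest ih =>
    simp [buildPrefix, ih]
    omega

theorem buildPrefix_split (nums : List (List Int)) (acc1 acc2 : List Int) (h : acc2 ≠ []) :
    buildPrefix nums (acc1 ++ acc2) = acc1 ++ buildPrefix nums acc2 := by
  induction nums generalizing acc2 with
  | nil => simp [buildPrefix]
  | cons num rest ih =>
    simp only [buildPrefix]
    rw [getLastD_append_ne _ _ h, List.append_assoc]
    exact ih (acc2 ++ [acc2.getLastD 0 + num.getD 1 0]) (by simp)

theorem buildPrefix_shift (nums : List (List Int)) (x : Int) :
    buildPrefix nums [x] = (buildPrefix nums [0]).map (fun y => x + y) := by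
  induction nums generalizing x with
  | nil => simp [buildPrefix]
  | cons num rest ih =>
    simp only [buildPrefix, getLastD_singleton]
    rw [buildPrefix_split rest [x] [x + num.getD 1 0] (by simp),
        buildPrefix_split rest [0] [0 + num.getD 1 0] (by simp),
        ih (x + num.getD 1 0), ih (0 + num.getD 1 0)]
    simp only [List.map_map, List.map_cons, List.cons_append,
      List.nil_append]
    congr 1
    · omega
    · apply List.map_congr_left
      intro a _
      simp only [Function.comp_apply]
      omega

theorem map_getD_lt (P : List Int) (c : Int) (i : ℕ) (h : i < P.length) :
    (P.map (fun y => c + y)).getD i 0 = c + P.getD i 0 := by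
  rw [List.getD_eq_getElem _ _ (by simpa using h), List.getD_eq_getElem _ _ h]
  simp

theorem buildPrefix_cons (num : List Int) (rest : List (List Int)) :
    buildPrefix (num :: rest) [0]
      = 0 :: (buildPrefix rest [0]).map (fun y => num.getD 1 0 + y) := by
  simp only [buildPrefix, getLastD_singleton, zero_add]
  rw [buildPrefix_split rest [0] [num.getD 1 0] (by simp), buildPrefix_shift]
  rfl

theorem check_alt_step (num : List Int) (rest : List (List Int)) (k : Int) :
    check_alt (num :: rest) k =
      if k ≥ num.getD 0 0 then check_alt rest (k - num.getD 1 0) else 0 := by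
  have hall :
      (List.range (num :: rest).length).all
        (fun i => decide (k - (buildPrefix (num :: rest) [0]).getD i 0
            ≥ ((num :: rest).getD i []).getD 0 0))
      = (decide (k - 0 ≥ num.getD 0 0) &&
         (List.range rest.length).all
           (fun i => decide (k - num.getD 1 0 - (buildPrefix rest [0]).getD i 0
              ≥ (rest.getD i []).getD 0 0))) := by
    rw [buildPrefix_cons, List.length_cons, List.range_succ_eq_map, List.all_cons, List.all_map]
    congr 1
    rw [Bool.eq_iff_iff]
    simp only [List.all_eq_true, List.mem_range, Function.comp]
    constructor <;>
      (intro h i hi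
       have h2 := h i hi
       have hlen : i < (buildPrefix rest [0]).length := by
         rw [buildPrefix_length]; simp; omega
       simp only [List.getD_cons_succ, map_getD_lt _ _ _ hlen, decide_eq_true_eq] at h2 ⊢
       omega)
  have hd : decide (k - 0 ≥ num.getD 0 0) = decide (k ≥ num.getD 0 0) := by
    simp only [decide_eq_decide]
    omega
  simp only [check_alt, hall, hd]
  have hb : ∀ (b : Bool), (if (decide (k ≥ num.getD 0 0) && b) = true then (1 : Int) else 0)
      = if k ≥ num.getD 0 0 then (if b = true then (1 : Int) else 0) else 0 := by
    intro b
    by_cases hk : num[0]?.getD 0 ≤ k <;> simp [List.getD, ge_iff_le, hk]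
  exact hb _

-- ===== VERDICT (by name: the statement is the Claim_ definition above) =====
theorem check_spec : Claim_equal_check := by
  unfold Claim_equal_check
  intro nums k hd hp
  clear hd hp
  unfold Spec_check check
  induction nums generalizing k with
  | nil => simp [checkGo, check_alt, buildPrefix]
  | cons num rest ih =>
    rw [check_alt_step, checkGo]
    simp [ih]
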